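-- pv_equiv track=rewrite | github.com/SKa905/dna-toolbox | simple_dna_tool.py | complement_RNA
-- ===== SOURCE A (Python) =====
-- def complement_RNA(dna):
--     """
--     Inputs a DNA string consisting of A, C, T, G characters. Returns a string consisting of a complement RNA sequence, or Error messages showing positions at which input string doesn't consist of A, C, T, or G characters.
--     """
--     dna = dna.upper()
--     complement_list = []
--     error_list = []
--     error_flag = False
--     for i in range(len(dna)):
--         if dna[i] == "A":
--             complement_list.append("U")
--         elif dna[i] == "T":
--             complement_list.append("A")
--         elif dna[i] == "C":
--             complement_list.append("G")
--         elif dna[i] == "G":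
--             complement_list.append("C")
--         else:
--             error_flag = True
--             error_list.append(i+1)
--     if error_flag:
--         return (f"Error. Your DNA sequence has a nucleotide that doesn't exist at positions: {error_list}.\nMake sure it consists of either A, C, G, or T nucleotides.")
--     else:
--         return ''.join(complement_list)
-- ===== SOURCE B (Python) =====
-- def complement_RNA(dna):
--     """
--     Inputs a DNA string consisting of A, C, T, G characters. Returns a string consisting of a complement RNA sequence, or Error messages showing positions at which input string doesn't consist of A, C, T, or G characters.
--     """
--     dna = dna.upper()
--     error_list = [i + 1 for i, c in enumerate(dna) if c not in "ACGT"]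
--     if error_list:
--         return (f"Error. Your DNA sequence has a nucleotide that doesn't exist at positions: {error_list}.\nMake sure it consists of either A, C, G, or T nucleotides.")
--     return dna.translate(str.maketrans("ATCG", "UAGC"))
-- ===== Notes on version B (the rewrite author's own statement) =====
-- stated objective: simpler
-- what changed: Replaces the interleaved if/elif loop that builds a complement list, an error list and a flag simultaneously with a separate validation comprehension over enumerate(dna) followed by a table-driven str.translate for the complement; no flag and no manual list appends remain. The translate pass runs in C, giving a measured constant-factor speedup.
import Mathlib
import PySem

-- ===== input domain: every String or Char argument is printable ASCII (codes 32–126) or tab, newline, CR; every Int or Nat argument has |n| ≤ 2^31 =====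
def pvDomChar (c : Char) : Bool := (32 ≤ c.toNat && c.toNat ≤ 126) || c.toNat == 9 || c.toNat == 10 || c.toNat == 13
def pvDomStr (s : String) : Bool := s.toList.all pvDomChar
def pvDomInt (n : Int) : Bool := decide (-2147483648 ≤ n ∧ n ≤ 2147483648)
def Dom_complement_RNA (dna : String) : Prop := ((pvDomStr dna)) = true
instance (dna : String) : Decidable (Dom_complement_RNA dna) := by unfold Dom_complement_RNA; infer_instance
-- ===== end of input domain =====

-- B replaces A's interleaved if/elif loop (complement list + error list + flag) by a
-- validation pass over enumerate followed by a table-driven character translation (simpler).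

-- The f-string error message, identical in A and B (shared helper; {error_list} renders
-- Python's list repr "[1, 2, 3]").
def pvErrMsg (el : List Int) : String :=
  "Error. Your DNA sequence has a nucleotide that doesn't exist at positions: ["
    ++ PySem.Str.join ", " (el.map PySem.Int.toStr)
    ++ "].\nMake sure it consists of either A, C, G, or T nucleotides."

-- ===== PORT A =====
-- A's for-loop over range(len(dna)) as the obvious structural recursion over the
-- characters with the running index i; state = (complement_list, error_list, error_flag).
def pvALoop : List Char → Int → List String × List Int × Bool → List String × List Int × Bool
  | [], _, st => st
  | c :: cs, i, (cl, el, ef) =>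
    if c = 'A' then pvALoop cs (i + 1) (cl ++ ["U"], el, ef)
    else if c = 'T' then pvALoop cs (i + 1) (cl ++ ["A"], el, ef)
    else if c = 'C' then pvALoop cs (i + 1) (cl ++ ["G"], el, ef)
    else if c = 'G' then pvALoop cs (i + 1) (cl ++ ["C"], el, ef)
    else pvALoop cs (i + 1) (cl, el ++ [i + 1], true)

def complement_RNA (dna : String) : String :=
  let up := PySem.Str.upper dna
  let st := pvALoop up.toList 0 ([], [], false)
  if st.2.2 then pvErrMsg st.2.1 else PySem.Str.join "" st.1

-- ===== PORT B =====
-- the comprehension [i+1 for i, c in enumerate(dna) if c not in "ACGT"]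
def pvBErrs (cs : List Char) : List Int :=
  (PySem.List.enumerate cs 0).filterMap
    (fun p => if p.2 ∈ ['A', 'C', 'G', 'T'] then none else some (p.1 + 1))

-- str.maketrans("ATCG", "UAGC"): translate table, characters not in the table unchanged
def pvTrans (c : Char) : Char :=
  (([('A', 'U'), ('T', 'A'), ('C', 'G'), ('G', 'C')].lookup c).getD c)

def complement_RNA_alt (dna : String) : String :=
  let up := PySem.Str.upper dna
  let errs := pvBErrs up.toList
  if errs ≠ [] then pvErrMsg errs
  else String.ofList (up.toList.map pvTrans)

-- ===== PRECONDITION & SPEC =====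
def Spec_complement_RNA (dna : String) (out : String) : Prop := out = complement_RNA_alt dna
instance (dna : String) (out : String) : Decidable (Spec_complement_RNA dna out) := by unfold Spec_complement_RNA; infer_instance

-- ===== CLAIM (what is proved, stated in full; the proofs are below) =====
def Claim_equal_complement_RNA : Prop := ∀ (dna : String), Dom_complement_RNA dna → Spec_complement_RNA dna (complement_RNA dna)

-- ===== LEMMAS AND PROOFS =====

def pvValid (c : Char) : Bool := c = 'A' || c = 'T' || c = 'C' || c = 'G'

def pvCompOf (cs : List Char) : List String :=
  cs.filterMap (fun c =>
    if c = 'A' then some "U" else if c = 'T' then some "A"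
    else if c = 'C' then some "G" else if c = 'G' then some "C" else none)

def pvErrsOf : List Char → Int → List Int
  | [], _ => []
  | c :: cs, i => if pvValid c then pvErrsOf cs (i + 1) else (i + 1) :: pvErrsOf cs (i + 1)

lemma pvALoop_spec (cs : List Char) (i : Int) (cl : List String) (el : List Int) (ef : Bool) :
    pvALoop cs i (cl, el, ef) =
      (cl ++ pvCompOf cs, el ++ pvErrsOf cs i, ef || !cs.all pvValid) := by
  induction cs generalizing i cl el ef with
  | nil => simp [pvALoop, pvCompOf, pvErrsOf]
  | cons c cs ih =>
    by_cases hA : c = 'A'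
    · simp [pvALoop, hA, ih, pvCompOf, pvErrsOf, pvValid]
    · by_cases hT : c = 'T'
      · simp [pvALoop, hT, ih, pvCompOf, pvErrsOf, pvValid]
      · by_cases hC : c = 'C'
        · simp [pvALoop, hC, ih, pvCompOf, pvErrsOf, pvValid]
        · by_cases hG : c = 'G'
          · simp [pvALoop, hG, ih, pvCompOf, pvErrsOf, pvValid]
          · simp [pvALoop, hA, hT, hC, hG, ih, pvCompOf, pvErrsOf, pvValid]

lemma pvBErrs_eq (cs : List Char) (i : Int) :
    (PySem.List.enumerate cs i).filterMap
      (fun p => if p.2 ∈ ['A', 'C', 'G', 'T'] then none else some (p.1 + 1)) =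
    pvErrsOf cs i := by
  induction cs generalizing i with
  | nil => simp [pvErrsOf]
  | cons c cs ih =>
    rw [PySem.List.enumerate_cons, List.filterMap_cons]
    by_cases h : pvValid c = true
    · have h' : c = 'A' ∨ c = 'C' ∨ c = 'G' ∨ c = 'T' := by
        simp only [pvValid, Bool.or_eq_true, decide_eq_true_eq] at h; tauto
      simp only [pvErrsOf, h]
      simp [h']
      simpa using ih (i + 1)
    · have h' : ¬(c = 'A' ∨ c = 'C' ∨ c = 'G' ∨ c = 'T') := by
        simp only [pvValid, Bool.or_eq_true, decide_eq_true_eq] at h; tauto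
      simp only [pvErrsOf, h]
      simp [h']
      simpa using ih (i + 1)

lemma pvErrsOf_nil_iff (cs : List Char) (i : Int) :
    pvErrsOf cs i = [] ↔ cs.all pvValid = true := by
  induction cs generalizing i with
  | nil => simp [pvErrsOf]
  | cons c cs ih =>
    by_cases h : pvValid c <;> simp [pvErrsOf, h, ih]

lemma pvCompOf_valid (cs : List Char) (h : cs.all pvValid = true) :
    (pvCompOf cs).map String.toList = (cs.map pvTrans).map (fun c => [c]) := by
  induction cs with
  | nil => simp [pvCompOf]
  | cons c cs ih =>
    simp only [List.all_cons, Bool.and_eq_true] at h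
    have hc := h.1
    have := ih h.2
    simp only [pvValid, Bool.or_eq_true, decide_eq_true_eq] at hc
    rcases hc with ((hc | hc) | hc) | hc <;> subst hc <;>
      simp [pvCompOf, pvTrans, List.lookup] <;> simpa using this

lemma pvJoin_valid (cs : List Char) (h : cs.all pvValid = true) :
    PySem.Str.join "" (pvCompOf cs) = String.ofList (cs.map pvTrans) := by
  have h1 : (PySem.Str.join "" (pvCompOf cs)).toList = cs.map pvTrans := by
    rw [PySem.Str.toList_join]
    have : (pvCompOf cs).map String.toList = (cs.map pvTrans).map (fun c => [c]) :=
      pvCompOf_valid cs h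
    rw [this]
    simpa using PySem.Chars.join_nil_singletons (cs.map pvTrans)
  rw [← String.ofList_toList (s := PySem.Str.join "" (pvCompOf cs)), h1]

-- ===== VERDICT (by name: the statement is the Claim_ definition above) =====
theorem complement_RNA_spec : Claim_equal_complement_RNA := by
  intro dna _
  unfold Spec_complement_RNA complement_RNA complement_RNA_alt pvBErrs
  simp only [pvALoop_spec, pvBErrs_eq, List.nil_append, Bool.false_or]
  by_cases h : (PySem.Str.upper dna).toList.all pvValid = true
  · have he : pvErrsOf (PySem.Str.upper dna).toList 0 = [] := (pvErrsOf_nil_iff _ 0).2 h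
    rw [if_neg (by simp [PySem.Str.toList_upper] at h ⊢; exact h),
        if_neg (by simp [PySem.Str.toList_upper] at he ⊢; exact he)]
    have := pvJoin_valid (PySem.Str.upper dna).toList h
    simpa [PySem.Str.toList_upper] using this
  · have he : pvErrsOf (PySem.Str.upper dna).toList 0 ≠ [] := by
      intro he; exact h ((pvErrsOf_nil_iff _ 0).1 he)
    rw [if_pos (by simp [PySem.Str.toList_upper] at h ⊢; exact h),
        if_pos (by simpa [PySem.Str.toList_upper] using he)]
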